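-- pv_equiv track=rewrite | github.com/Shreyansh-jain-2201/CODES | PythonCodes/hillCipher.py | bogusElement
-- ===== SOURCE A (Python) =====
-- def bogusElement(plaintext):
--     alphabets = ['A', 'B', 'C', 'D', 'E', 'F', 'G', 'H', 'I', 'J', 'K', 'L', 'M', 'N', 'O', 'P', 'Q', 'R', 'S', 'T', 'U', 'V', 'W', 'X', 'Y', 'Z']
--     plaintext = list(plaintext.upper())
--     if not "X" in plaintext:
--         return "X"
--     else:
--         for i in reversed(alphabets):
--             if not i in plaintext:
--                 return i
-- ===== SOURCE B (Python) =====
-- def bogusElement(plaintext):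
--     missing = set("ABCDEFGHIJKLMNOPQRSTUVWXYZ") - set(plaintext.upper())
--     if "X" in missing:
--         return "X"
--     return max(missing) if missing else None
-- ===== Notes on version B (the rewrite author's own statement) =====
-- stated objective: simpler
-- what changed: Replaces the X-guard plus ordered reversed-alphabet scan (each step a linear membership test over the plaintext) with one set difference over the plaintext and max() of the missing letters.
import Mathlib
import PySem

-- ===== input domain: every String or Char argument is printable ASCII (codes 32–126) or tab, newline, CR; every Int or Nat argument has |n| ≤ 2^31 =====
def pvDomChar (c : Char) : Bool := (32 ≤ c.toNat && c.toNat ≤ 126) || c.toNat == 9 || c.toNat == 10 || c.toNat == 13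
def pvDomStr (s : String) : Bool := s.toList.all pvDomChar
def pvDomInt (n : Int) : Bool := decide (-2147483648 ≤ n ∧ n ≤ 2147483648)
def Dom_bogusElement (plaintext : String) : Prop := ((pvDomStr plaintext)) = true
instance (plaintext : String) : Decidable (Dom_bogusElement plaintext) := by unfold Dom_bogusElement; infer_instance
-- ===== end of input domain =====

-- B replaces the ordered reversed-alphabet scan with a set difference and max(): simpler, same behaviour.

-- ===== PORT A =====
def bogusAlphabets : List Char :=
  ['A', 'B', 'C', 'D', 'E', 'F', 'G', 'H', 'I', 'J', 'K', 'L', 'M',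
   'N', 'O', 'P', 'Q', 'R', 'S', 'T', 'U', 'V', 'W', 'X', 'Y', 'Z']

def bogusElement (plaintext : String) : Option String :=
  let pl : List Char := (PySem.Str.upper plaintext).toList
  if ¬ ('X' ∈ pl) then some "X"
  else
    -- for i in reversed(alphabets): if not i in plaintext: return i   (falls off the end → None)
    (bogusAlphabets.reverse.find? (fun i => !(pl.contains i))).map (fun c => String.ofList [c])

-- ===== PORT B =====
def bogusElement_alt (plaintext : String) : Option String :=
  let missing : PySem.Set Char :=
    PySem.Set.diff (PySem.Set.ofList "ABCDEFGHIJKLMNOPQRSTUVWXYZ".toList)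
      ((PySem.Str.upper plaintext).toList)
  if 'X' ∈ missing then some "X"
  else (PySem.List.max? missing (fun c => c)).map (fun c => String.ofList [c])

-- ===== PRECONDITION & SPEC =====
def Spec_bogusElement (plaintext : String) (out : Option String) : Prop := out = bogusElement_alt plaintext
instance (plaintext : String) (out : Option String) : Decidable (Spec_bogusElement plaintext out) := by unfold Spec_bogusElement; infer_instance

-- ===== CLAIM (what is proved, stated in full; the proofs are below) =====
def Claim_equal_bogusElement : Prop := ∀ (plaintext : String), Dom_bogusElement plaintext → Spec_bogusElement plaintext (bogusElement plaintext)

-- ===== LEMMAS AND PROOFS =====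

-- first hit of a backward scan = last satisfying element
theorem find_reverse_eq_getLast_filter (p : Char → Bool) (l : List Char) :
    l.reverse.find? p = (l.filter p).getLast? := by
  induction l with
  | nil => rfl
  | cons a t ih =>
      simp only [List.reverse_cons, List.find?_append, ih, List.filter_cons]
      by_cases h : p a
      · simp [h, List.getLast?_cons]
      · simp [h]

theorem foldl_max_sorted (t : List Char) (x : Char)
    (hs : t.Pairwise (· < ·)) (hx : ∀ y ∈ t, x < y) :
    t.foldl max x = (x :: t).getLast (by simp) := by
  induction t generalizing x with
  | nil => rfl
  | cons y t ih =>
      obtain ⟨h1, h2⟩ := List.pairwise_cons.mp hs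
      have hxy : max x y = y := max_eq_right (le_of_lt (hx y (by simp)))
      simp only [List.foldl_cons, hxy]
      rw [ih y h2 h1]
      simp [List.getLast_cons]

-- max? with identity key on a strictly increasing list = its last element
theorem max?_sorted_eq_getLast? (l : List Char) (hs : l.Pairwise (· < ·)) :
    PySem.List.max? l (fun c => c) = l.getLast? := by
  cases l with
  | nil => rfl
  | cons x t =>
      rw [PySem.List.max?_id_cons]
      rw [foldl_max_sorted t x (List.pairwise_cons.mp hs).2 (List.pairwise_cons.mp hs).1]
      simp [List.getLast?_eq_some_getLast]

theorem find_reverse_eq_max?_filter (p : Char → Bool) (l : List Char)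
    (hs : l.Pairwise (· < ·)) :
    l.reverse.find? p = PySem.List.max? (l.filter p) (fun c => c) := by
  rw [find_reverse_eq_getLast_filter, max?_sorted_eq_getLast? _ (List.Pairwise.filter p hs)]

-- ===== VERDICT (by name: the statement is the Claim_ definition above) =====
theorem bogusElement_spec : Claim_equal_bogusElement := by
  intro plaintext _
  unfold Spec_bogusElement bogusElement bogusElement_alt
  have hnodup : PySem.Set.ofList "ABCDEFGHIJKLMNOPQRSTUVWXYZ".toList = bogusAlphabets := by decide
  rw [hnodup]
  set pl : List Char := (PySem.Str.upper plaintext).toList with hpl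
  have hdiff : PySem.Set.diff bogusAlphabets pl = bogusAlphabets.filter (fun i => !(pl.contains i)) := rfl
  have hmemX : ('X' ∈ PySem.Set.diff bogusAlphabets pl) ↔ ¬ ('X' ∈ pl) := by
    rw [hdiff]
    simp [List.mem_filter, bogusAlphabets]
  by_cases hx : 'X' ∈ pl
  · simp only [hx, not_true]
    rw [if_neg (by simp), if_neg (by simpa using hmemX.not.mpr (by simp [hx])), hdiff]
    rw [find_reverse_eq_max?_filter (fun i => !(pl.contains i)) bogusAlphabets (by decide)]
  · rw [if_pos (by simp [hx]), if_pos (hmemX.mpr hx)]
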